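-- pv_equiv track=rewrite | github.com/zhoujx4/Crawls | gitlab-new/tt/tt/spiders/fangesf.py | url_contains_i3_page
-- ===== SOURCE A (Python) =====
-- def url_contains_i3_page(result_obj_path = ""):
-- 	if 1 > len( result_obj_path ):
-- 		return False
-- 	path_fragment_list = result_obj_path.split("/")
-- 	if 1 > len( path_fragment_list ):
-- 		return False
-- 	for one in path_fragment_list:
-- 		if 0 == one.find("i3"):
-- 			return True
-- 		elif 0 == one.find("g2") and 0 < one.find("-i3"):
-- 			# the bedroom url looks like g299-i39
-- 			return True
-- 	return False
-- ===== SOURCE B (Python) =====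
-- def url_contains_i3_page(result_obj_path = ""):
--     # Single forward scan over the raw string: no split(), no fragment list.
--     # At each fragment start, test for "i3"; inside a fragment that starts
--     # with "g2", scan character by character for "-i3" before the next "/".
--     s = result_obj_path
--     while True:
--         if s.startswith("i3"):
--             return True
--         if s.startswith("g2"):
--             t = s
--             while t and t[0] != "/":
--                 if t.startswith("-i3"):
--                     return True
--                 t = t[1:]
--         j = s.find("/")
--         if j < 0:
--             return False
--         s = s[j + 1:]
-- ===== Notes on version B (the rewrite author's own statement) =====
-- stated objective: alternative
-- what changed: Replaces split('/') plus a per-fragment find() loop with a single forward scan of the raw string that tests 'i3' at each fragment start, scans g2-fragments character by character for '-i3', and jumps to the next '/'; no fragment list is ever built.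
import Mathlib
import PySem

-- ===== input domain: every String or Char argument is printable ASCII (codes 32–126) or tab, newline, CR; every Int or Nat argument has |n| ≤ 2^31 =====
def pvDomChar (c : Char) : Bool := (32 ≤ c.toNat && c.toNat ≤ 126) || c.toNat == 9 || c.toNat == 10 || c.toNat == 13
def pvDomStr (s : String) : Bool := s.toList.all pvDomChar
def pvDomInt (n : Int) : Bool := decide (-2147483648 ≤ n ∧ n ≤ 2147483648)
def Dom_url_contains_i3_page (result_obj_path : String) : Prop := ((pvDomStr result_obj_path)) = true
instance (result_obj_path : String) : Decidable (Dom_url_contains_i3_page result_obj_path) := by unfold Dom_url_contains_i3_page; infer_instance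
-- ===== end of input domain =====

-- B replaces split('/') + a per-fragment find() loop by one forward scan of the raw string (alternative decomposition, no fragment list).

-- ===== PORT A =====
-- the for-loop over the fragment list, early return on a hit
def pvALoop : List (List Char) → Bool
  | [] => false
  | f :: rest =>
      if PySem.Chars.find f "i3".toList == 0 then true
      else if (PySem.Chars.find f "g2".toList == 0) && (0 < PySem.Chars.find f "-i3".toList) then true
      else pvALoop rest

def url_contains_i3_page (result_obj_path : String) : Bool :=
  if 1 > PySem.Str.len result_obj_path then false
  else
    let path_fragment_list := PySem.Chars.splitOn result_obj_path.toList "/".toList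
    if 1 > path_fragment_list.length then false
    else pvALoop path_fragment_list

-- ===== PORT B =====
-- inner while loop: scan for "-i3" before the next '/'
def pvFragScan : List Char → Bool
  | [] => false
  | c :: r =>
      if c == '/' then false
      else if PySem.Chars.startswith (c :: r) "-i3".toList then true
      else pvFragScan r

-- outer while loop: examine the fragment starting here, then jump past the next '/'
def pvGo (s : List Char) : Bool :=
  if PySem.Chars.startswith s "i3".toList then true
  else if PySem.Chars.startswith s "g2".toList && pvFragScan s then true
  else
    let j := PySem.Chars.find s "/".toList
    if j < 0 then false
    else pvGo (PySem.List.slice s (some (j + 1)) none)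
termination_by s.length
decreasing_by
  have hj : ¬ PySem.Chars.find s "/".toList < 0 := by assumption
  have h0 : (0 : Int) ≤ PySem.Chars.find s "/".toList := by omega
  have hinf : "/".toList <:+: s := (PySem.Chars.find_nonneg_iff s "/".toList).mp h0
  have hne : s ≠ [] := by
    intro h; subst h
    simp [List.infix_iff_prefix_suffix] at hinf
  rw [PySem.List.slice_from s (show (0:Int) ≤ PySem.Chars.find s "/".toList + 1 by omega)]
  have : 0 < ((PySem.Chars.find s "/".toList) + 1).toNat := by omega
  simp only [List.length_drop]
  have := List.length_pos_of_ne_nil hne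
  omega

def url_contains_i3_page_alt (result_obj_path : String) : Bool :=
  pvGo result_obj_path.toList

-- ===== PRECONDITION & SPEC =====
def Spec_url_contains_i3_page (result_obj_path : String) (out : Bool) : Prop := out = url_contains_i3_page_alt result_obj_path
instance (result_obj_path : String) (out : Bool) : Decidable (Spec_url_contains_i3_page result_obj_path out) := by unfold Spec_url_contains_i3_page; infer_instance

-- ===== CLAIM (what is proved, stated in full; the proofs are below) =====
def Claim_equal_url_contains_i3_page : Prop := ∀ (result_obj_path : String), Dom_url_contains_i3_page result_obj_path → Spec_url_contains_i3_page result_obj_path (url_contains_i3_page result_obj_path)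

-- ===== LEMMAS AND PROOFS =====

-- the per-fragment test of A's loop
def pvP (f : List Char) : Bool :=
  (PySem.Chars.find f "i3".toList == 0) ||
  ((PySem.Chars.find f "g2".toList == 0) && (0 < PySem.Chars.find f "-i3".toList))

theorem pvALoop_eq_any (fs : List (List Char)) : pvALoop fs = fs.any pvP := by
  induction fs with
  | nil => rfl
  | cons f rest ih =>
      rw [List.any_cons, ← ih]
      show (if (PySem.Chars.find f "i3".toList == 0) = true then true
            else if ((PySem.Chars.find f "g2".toList == 0) && (0 < PySem.Chars.find f "-i3".toList)) = true then true
            else pvALoop rest) = (pvP f || pvALoop rest)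
      unfold pvP
      split_ifs with h1 h2 <;> simp_all

-- find = 0 iff prefix
theorem pv_find_eq_zero_iff (s sub : List Char) :
    PySem.Chars.find s sub = 0 ↔ sub <+: s := by
  constructor
  · intro h
    have h0 : (0 : Int) ≤ PySem.Chars.find s sub := by rw [h]
    have := (PySem.Chars.find_spec h0).1
    rw [h] at this
    simpa using this
  · intro h
    have h0 : (0 : Int) ≤ PySem.Chars.find s sub :=
      (PySem.Chars.find_nonneg_iff s sub).mpr h.isInfix
    by_contra hne
    have hpos : 0 < (PySem.Chars.find s sub).toNat := by omega
    have := (PySem.Chars.find_spec h0).2 0 hpos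
    simp at this
    exact this h

-- a slash-free pattern is a prefix of takeWhile (· ≠ '/') iff it is a prefix of the list
theorem pv_prefix_takeWhile_iff (sub l : List Char) (h : '/' ∉ sub) :
    sub <+: l.takeWhile (· ≠ '/') ↔ sub <+: l := by
  induction sub generalizing l with
  | nil => simp
  | cons c sub' ih =>
      have hc : c ≠ '/' := fun hc => h (hc ▸ List.mem_cons_self)
      have hsub : '/' ∉ sub' := fun hm => h (List.mem_cons_of_mem _ hm)
      cases l with
      | nil => simp
      | cons a r =>
          by_cases ha : a = '/'
          · subst ha
            rw [List.takeWhile_cons_of_neg (by simp)]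
            simp [List.cons_prefix_cons, hc]
          · rw [List.takeWhile_cons_of_pos (by simp [ha])]
            simp only [List.cons_prefix_cons]
            rw [ih r hsub]

-- pvFragScan finds "-i3" exactly when it occurs before the next '/'
theorem pvFragScan_iff (l : List Char) :
    pvFragScan l = true ↔ "-i3".toList <:+: l.takeWhile (· ≠ '/') := by
  induction l with
  | nil => simp [pvFragScan]
  | cons c r ih =>
      by_cases hc : c = '/'
      · subst hc
        rw [List.takeWhile_cons_of_neg (by simp)]
        simp [pvFragScan]
      · rw [List.takeWhile_cons_of_pos (by simp [hc])]
        rw [List.infix_cons_iff]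
        have hstep : pvFragScan (c :: r) =
            (if c == '/' then false
             else if PySem.Chars.startswith (c :: r) "-i3".toList then true
             else pvFragScan r) := rfl
        rw [hstep, if_neg (by simp [hc])]
        have hnp : '/' ∉ "-i3".toList := by decide
        have hpref : "-i3".toList <+: c :: r.takeWhile (· ≠ '/') ↔ "-i3".toList <+: c :: r := by
          have h2 := pv_prefix_takeWhile_iff "-i3".toList (c :: r) hnp
          rwa [List.takeWhile_cons_of_pos (by simp [hc])] at h2
        by_cases hs : PySem.Chars.startswith (c :: r) "-i3".toList = true
        · rw [if_pos hs]
          exact iff_of_true rfl (Or.inl (hpref.mpr ((PySem.Chars.startswith_iff _ _).mp hs)))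
        · rw [if_neg hs, ih]
          have hnpref : ¬ "-i3".toList <+: c :: r.takeWhile (· ≠ '/') := fun hp =>
            hs ((PySem.Chars.startswith_iff _ _).mpr (hpref.mp hp))
          constructor
          · exact fun h => Or.inr h
          · rintro (h | h)
            · exact absurd h hnpref
            · exact h

-- character-wise reference version of split('/')
def pvFrags : List Char → List (List Char)
  | [] => [[]]
  | c :: r => if c = '/' then [] :: pvFrags r else (pvFrags r).modifyHead (c :: ·)

theorem pvFrags_ne_nil (l : List Char) : pvFrags l ≠ [] := by
  induction l with
  | nil => simp [pvFrags]
  | cons c r ih =>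
      by_cases hc : c = '/' <;> simp [pvFrags, hc]
      cases h : pvFrags r with
      | nil => exact absurd h ih
      | cons a t => simp

theorem pv_go_eq (fuel : Nat) (l cur : List Char) (acc : List (List Char))
    (h : l.length < fuel) :
    PySem.Chars.splitOn.go ['/'] fuel l cur acc =
      acc.reverse ++ (pvFrags l).modifyHead (cur.reverse ++ ·) := by
  induction fuel generalizing l cur acc with
  | zero => omega
  | succ f ih =>
      cases l with
      | nil => simp [PySem.Chars.splitOn.go, pvFrags]
      | cons c rest =>
          have hstep : PySem.Chars.splitOn.go ['/'] (f + 1) (c :: rest) cur acc =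
              (if ['/'].isPrefixOf (c :: rest) = true then
                 PySem.Chars.splitOn.go ['/'] f (List.drop ['/'].length (c :: rest)) [] (cur.reverse :: acc)
               else PySem.Chars.splitOn.go ['/'] f rest (c :: cur) acc) := rfl
          by_cases hc : c = '/'
          · subst hc
            rw [hstep, if_pos (by simp [List.isPrefixOf])]
            have hlen : List.drop ['/'].length ('/' :: rest) = rest := rfl
            rw [hlen, ih rest [] (cur.reverse :: acc) (by simpa using Nat.lt_of_succ_lt_succ h)]
            simp [pvFrags]
            cases pvFrags rest <;> simp
          · rw [hstep, if_neg (by simp [List.isPrefixOf]; exact fun hh => hc hh.symm)]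
            rw [ih rest (c :: cur) acc (by simpa using Nat.lt_of_succ_lt_succ h)]
            simp only [pvFrags, if_neg hc]
            congr 1
            cases hfr : pvFrags rest with
            | nil => exact absurd hfr (pvFrags_ne_nil rest)
            | cons a t => simp

theorem pv_splitOn_eq_frags (l : List Char) :
    PySem.Chars.splitOn l "/".toList = pvFrags l := by
  unfold PySem.Chars.splitOn
  have hsep : "/".toList = ['/'] := rfl
  rw [hsep, pv_go_eq (l.length + 1) l [] [] (by omega)]
  simp only [List.reverse_nil, List.nil_append]
  cases h : pvFrags l with
  | nil => exact absurd h (pvFrags_ne_nil l)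
  | cons a t => simp

theorem pvFrags_no_slash (l : List Char) (h : '/' ∉ l) : pvFrags l = [l] := by
  induction l with
  | nil => rfl
  | cons c r ih =>
      have hc : c ≠ '/' := fun hc => h (hc ▸ List.mem_cons_self)
      have hr : '/' ∉ r := fun hm => h (List.mem_cons_of_mem _ hm)
      simp [pvFrags, hc, ih hr]

theorem pvFrags_split (k : Nat) (l : List Char) (hk : k < l.length)
    (hc : l[k] = '/') (hmin : ∀ i (_ : i < k) (hil : i < l.length), l[i] ≠ '/') :
    pvFrags l = l.take k :: pvFrags (l.drop (k + 1)) := by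
  induction k generalizing l with
  | zero =>
      cases l with
      | nil => simp at hk
      | cons c r => simp at hc; simp [pvFrags, hc]
  | succ k ih =>
      cases l with
      | nil => simp at hk
      | cons c r =>
          have hc0 : c ≠ '/' := by
            have := hmin 0 (by omega) (by simp)
            simpa using this
          have hrec := ih r (by simpa using hk) (by simpa using hc)
            (fun i hi hil => by
              have := hmin (i + 1) (by omega) (by simpa using hil)
              simpa using this)
          simp [pvFrags, hc0, hrec]

-- head-fragment test: B's direct checks equal A's test on the first fragment
theorem pv_head_frag (l : List Char) :
    ((PySem.Chars.startswith l "i3".toList) ||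
     (PySem.Chars.startswith l "g2".toList && pvFragScan l)) =
      pvP (l.takeWhile (· ≠ '/')) := by
  rw [Bool.eq_iff_iff]
  simp only [Bool.or_eq_true, Bool.and_eq_true, pvP, beq_iff_eq, decide_eq_true_eq]
  have hi3 : PySem.Chars.startswith l "i3".toList = true ↔
      PySem.Chars.find (l.takeWhile (· ≠ '/')) "i3".toList = 0 := by
    rw [PySem.Chars.startswith_iff, pv_find_eq_zero_iff,
      pv_prefix_takeWhile_iff _ _ (by decide)]
  have hg2 : PySem.Chars.startswith l "g2".toList = true ↔
      PySem.Chars.find (l.takeWhile (· ≠ '/')) "g2".toList = 0 := by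
    rw [PySem.Chars.startswith_iff, pv_find_eq_zero_iff,
      pv_prefix_takeWhile_iff _ _ (by decide)]
  rw [hi3, hg2, pvFragScan_iff]
  apply or_congr_right
  apply and_congr_right
  intro hg
  have hpf : "g2".toList <+: l.takeWhile (· ≠ '/') := (pv_find_eq_zero_iff _ _).mp hg
  obtain ⟨t, ht⟩ := hpf
  have hnpref : ¬ "-i3".toList <+: l.takeWhile (· ≠ '/') := by
    rw [← ht]; simp [List.cons_prefix_cons]
  constructor
  · intro hinf
    have h0 : (0 : Int) ≤ PySem.Chars.find (l.takeWhile (· ≠ '/')) "-i3".toList :=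
      (PySem.Chars.find_nonneg_iff _ _).mpr hinf
    have hne : PySem.Chars.find (l.takeWhile (· ≠ '/')) "-i3".toList ≠ 0 := fun h =>
      hnpref ((pv_find_eq_zero_iff _ _).mp h)
    omega
  · intro hlt
    exact (PySem.Chars.find_nonneg_iff _ _).mp (le_of_lt hlt)

-- takeWhile up to the first slash is take of the slash position
theorem pv_takeWhile_eq_take (k : Nat) (l : List Char) (hk : k < l.length)
    (hc : l[k] = '/') (hmin : ∀ i (_ : i < k) (hil : i < l.length), l[i] ≠ '/') :
    l.takeWhile (· ≠ '/') = l.take k := by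
  induction k generalizing l with
  | zero =>
      cases l with
      | nil => simp at hk
      | cons c r => simp at hc; simp [hc, List.takeWhile_cons_of_neg]
  | succ k ih =>
      cases l with
      | nil => simp at hk
      | cons c r =>
          have hc0 : c ≠ '/' := by
            have := hmin 0 (by omega) (by simp); simpa using this
          rw [List.takeWhile_cons_of_pos (by simp [hc0]), List.take_succ_cons]
          rw [ih r (by simpa using hk) (by simpa using hc)
            (fun i hi hil => by
              have := hmin (i + 1) (by omega) (by simpa using hil)
              simpa using this)]

theorem pv_singleton_prefix_drop (l : List Char) (i : Nat) (hi : i < l.length) :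
    ("/".toList <+: l.drop i) ↔ l[i] = '/' := by
  rw [List.drop_eq_getElem_cons hi]
  constructor
  · intro h
    exact ((List.cons_prefix_cons.mp h).1).symm
  · intro h
    exact List.cons_prefix_cons.mpr ⟨h.symm, List.nil_prefix⟩

-- main loop equivalence
theorem pvGo_eq_any (l : List Char) : pvGo l = (pvFrags l).any pvP := by
  induction hn : l.length using Nat.strong_induction_on generalizing l with
  | _ n ih =>
  subst hn
  have hrw : pvGo l =
      ((PySem.Chars.startswith l "i3".toList ||
        (PySem.Chars.startswith l "g2".toList && pvFragScan l)) ||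
       (if PySem.Chars.find l "/".toList < 0 then false
        else pvGo (PySem.List.slice l (some (PySem.Chars.find l "/".toList + 1)) none))) := by
    rw [pvGo]
    cases h1 : PySem.Chars.startswith l "i3".toList <;>
      cases h2 : (PySem.Chars.startswith l "g2".toList && pvFragScan l) <;>
        simp_all
  rw [hrw, pv_head_frag l]
  by_cases hj : PySem.Chars.find l "/".toList < 0
  · -- no slash anywhere
    have hne : PySem.Chars.find l "/".toList = -1 := by
      have := PySem.Chars.neg_one_le_find l "/".toList; omega
    have hnin : '/' ∉ l := by
      have := (PySem.Chars.find_eq_neg_one_iff l "/".toList).mp hne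
      simpa [List.singleton_infix_iff] using this
    have htw : l.takeWhile (· ≠ '/') = l :=
      List.takeWhile_eq_self_iff.mpr (fun x hx => by
        simp; exact fun h => hnin (h ▸ hx))
    rw [if_pos hj, pvFrags_no_slash l hnin, htw]
    simp
  · -- slash at index k = (find l "/").toNat
    have h0 : (0 : Int) ≤ PySem.Chars.find l "/".toList := by omega
    have hspec := PySem.Chars.find_spec h0
    have hklen : (PySem.Chars.find l "/".toList).toNat < l.length := by
      by_contra hge
      have : l.drop (PySem.Chars.find l "/".toList).toNat = [] := List.drop_eq_nil_of_le (by omega)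
      rw [this] at hspec
      have := hspec.1
      simp [List.prefix_nil] at this
    have hc : l[(PySem.Chars.find l "/".toList).toNat] = '/' :=
      (pv_singleton_prefix_drop l _ hklen).mp hspec.1
    have hmin : ∀ i (_ : i < (PySem.Chars.find l "/".toList).toNat) (hil : i < l.length),
        l[i] ≠ '/' := fun i hi hil => by
      intro hieq
      exact hspec.2 i hi ((pv_singleton_prefix_drop l i hil).mpr hieq)
    rw [if_neg hj]
    rw [PySem.List.slice_from l (by omega)]
    have htonat : (PySem.Chars.find l "/".toList + 1).toNat =
        (PySem.Chars.find l "/".toList).toNat + 1 := by omega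
    rw [htonat]
    rw [ih (l.drop ((PySem.Chars.find l "/".toList).toNat + 1)).length
      (by simp; omega) _ rfl]
    rw [pvFrags_split (PySem.Chars.find l "/".toList).toNat l hklen hc hmin]
    rw [pv_takeWhile_eq_take (PySem.Chars.find l "/".toList).toNat l hklen hc hmin]
    simp

-- ===== VERDICT (by name: the statement is the Claim_ definition above) =====
theorem url_contains_i3_page_spec : Claim_equal_url_contains_i3_page := by
  intro s _
  unfold Spec_url_contains_i3_page url_contains_i3_page url_contains_i3_page_alt
  by_cases hemp : s.toList = []
  · have hl : PySem.Str.len s = 0 := by simp [hemp]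
    rw [if_pos (by omega)]
    have hf : ∀ sub : List Char, sub ≠ [] → PySem.Chars.find [] sub = -1 := fun sub h =>
      (PySem.Chars.find_eq_neg_one_iff _ _).mpr (by
        intro hin
        exact h (List.eq_nil_of_infix_nil hin))
    rw [hemp, pvGo_eq_any]
    have h1 := hf ['i', '3'] (by simp)
    have h2 := hf ['-', 'i', '3'] (by simp)
    simp [pvFrags, pvP]
    refine ⟨by omega, fun _ => by omega⟩
  · have hl : 0 < PySem.Str.len s := by
      simp only [PySem.Str.len_eq]
      exact_mod_cast List.length_pos_of_ne_nil hemp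
    rw [if_neg (by omega)]
    simp only [pv_splitOn_eq_frags]
    rw [if_neg (by
      have := List.length_pos_of_ne_nil (pvFrags_ne_nil s.toList)
      omega)]
    rw [pvALoop_eq_any, ← pvGo_eq_any]
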